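-- pv_equiv track=rewrite | github.com/MR10587/AI4BUSINESS | services.py | _score_from_text
-- ===== SOURCE A (Python) =====
-- def _score_from_text(value, default=5):
--     if not isinstance(value, str):
--         return default
--     text = value.strip().lower()
--     if not text:
--         return default
--
--     high_words = ["excellent", "very high", "strong", "clear", "clear need", "unique", "feasible", "logical"]
--     mid_words = ["moderate", "average", "medium", "somewhat", "partly"]
--     low_words = ["weak", "low", "unclear", "poor", "not feasible"]
--
--     if any(word in text for word in high_words):
--         return 8
--     if any(word in text for word in mid_words):
--         return 6
--     if any(word in text for word in low_words):
--         return 3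
--     return default
-- ===== SOURCE B (Python) =====
-- _KEYWORD_SCORES = {
--     "excellent": 8, "very high": 8, "strong": 8, "clear": 8, "clear need": 8,
--     "unique": 8, "feasible": 8, "logical": 8,
--     "moderate": 6, "average": 6, "medium": 6, "somewhat": 6, "partly": 6,
--     "weak": 3, "low": 3, "unclear": 3, "poor": 3, "not feasible": 3,
-- }
--
--
-- def _score_from_text(value, default=5):
--     # Single left-to-right scan of the text: at each position, check which
--     # keyword starts there and keep the best score seen.  Correct because the
--     # tier precedence of the original chain coincides with descending scores,
--     # so the maximum score over all keyword occurrences equals the chain.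
--     if not isinstance(value, str):
--         return default
--     text = value.strip().lower()
--     if not text:
--         return default
--     best = 0
--     for i in range(len(text)):
--         for kw, score in _KEYWORD_SCORES.items():
--             if score > best and text.startswith(kw, i):
--                 best = score
--     return best if best else default
-- ===== Notes on version B (the rewrite author's own statement) =====
-- stated objective: alternative
-- what changed: Replaces A's ordered chain of three per-tier any(substring)-then-return blocks by a single left-to-right scan over the text's positions against one flat keyword-to-score dict, accumulating the maximum matched score via startswith(kw, i); correct because tier precedence coincides with descending scores, so the max over all keyword occurrences equals the first-match-wins chain.
import Mathlib
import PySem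

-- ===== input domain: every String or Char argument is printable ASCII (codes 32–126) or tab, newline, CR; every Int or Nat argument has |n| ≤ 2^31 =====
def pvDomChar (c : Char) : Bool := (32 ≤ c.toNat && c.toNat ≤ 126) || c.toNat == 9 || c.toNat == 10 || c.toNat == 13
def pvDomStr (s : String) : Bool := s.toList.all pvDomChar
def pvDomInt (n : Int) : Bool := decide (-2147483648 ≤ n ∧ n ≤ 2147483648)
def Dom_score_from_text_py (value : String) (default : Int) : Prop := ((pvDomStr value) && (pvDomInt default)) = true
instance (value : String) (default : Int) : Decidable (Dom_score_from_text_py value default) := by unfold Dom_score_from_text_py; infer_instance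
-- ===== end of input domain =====

-- B replaces A's per-tier substring chain by a single scan over text positions against one flat
-- keyword→score table, keeping the maximum matched score (alternative decomposition; not faster).
-- ===== PORT A =====
def pvHighWords : List String := ["excellent", "very high", "strong", "clear", "clear need", "unique", "feasible", "logical"]
def pvMidWords : List String := ["moderate", "average", "medium", "somewhat", "partly"]
def pvLowWords : List String := ["weak", "low", "unclear", "poor", "not feasible"]

-- A: literal transliteration of the first-match-wins chain of three `if any(...)` blocks
def score_from_text_py (value : String) (default : Int) : Int :=
  let text := PySem.Str.lower (PySem.Str.strip value)
  if text = "" then default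
  else if pvHighWords.any (fun w => PySem.Str.isIn w text) then 8
  else if pvMidWords.any (fun w => PySem.Str.isIn w text) then 6
  else if pvLowWords.any (fun w => PySem.Str.isIn w text) then 3
  else default

-- ===== PORT B =====
-- B's flat keyword→score table (dict in insertion order)
def pvKW : List (String × Int) :=
  [("excellent", 8), ("very high", 8), ("strong", 8), ("clear", 8), ("clear need", 8),
   ("unique", 8), ("feasible", 8), ("logical", 8),
   ("moderate", 6), ("average", 6), ("medium", 6), ("somewhat", 6), ("partly", 6),
   ("weak", 3), ("low", 3), ("unclear", 3), ("poor", 3), ("not feasible", 3)]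

-- python's `text.startswith(kw, i)` for 0 ≤ i, ported by hand (exact there): prefix test at position i
def pvStartsAt (t : List Char) (i : Nat) (kw : String) : Bool :=
  PySem.Chars.startswith (t.drop i) kw.toList

-- B: one scan over the positions of the text, accumulating the best matched score
def score_from_text_py_alt (value : String) (default : Int) : Int :=
  let text := PySem.Str.lower (PySem.Str.strip value)
  if text = "" then default
  else
    let t := text.toList
    let best := (List.range t.length).foldl
      (fun best i =>
        pvKW.foldl (fun b kv => if kv.2 > b && pvStartsAt t i kv.1 then kv.2 else b) best)
      0
    if best = 0 then default else best

-- ===== PRECONDITION & SPEC =====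
def Spec_score_from_text_py (value : String) (default : Int) (out : Int) : Prop := out = score_from_text_py_alt value default
instance (value : String) (default : Int) (out : Int) : Decidable (Spec_score_from_text_py value default out) := by unfold Spec_score_from_text_py; infer_instance

-- ===== CLAIM (what is proved, stated in full; the proofs are below) =====
def Claim_equal_score_from_text_py : Prop := ∀ (value : String) (default : Int), Dom_score_from_text_py value default → Spec_score_from_text_py value default (score_from_text_py value default)

-- ===== LEMMAS AND PROOFS =====

-- the inner fold step as used by the scan
def pvUpd (P : String × Int → Bool) (b : Int) (kv : String × Int) : Int :=
  if kv.2 > b && P kv then kv.2 else b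

def pvInner (t : List Char) (i : Nat) (b : Int) : Int :=
  pvKW.foldl (pvUpd (fun kv => pvStartsAt t i kv.1)) b

def pvScan (t : List Char) : Int :=
  (List.range t.length).foldl (fun best i => pvInner t i best) 0

theorem alt_eq_scan (value : String) (default : Int) :
    score_from_text_py_alt value default =
      (let text := PySem.Str.lower (PySem.Str.strip value)
       if text = "" then default
       else if pvScan text.toList = 0 then default else pvScan text.toList) := rfl

-- monotonicity/extremal lemmas over the max-update fold
theorem le_foldl_upd (P : String × Int → Bool) (l : List (String × Int)) (b : Int) :
    b ≤ l.foldl (pvUpd P) b := by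
  induction l generalizing b with
  | nil => simp
  | cons kv l ih =>
    simp only [List.foldl_cons]
    refine le_trans ?_ (ih _)
    unfold pvUpd
    split
    · next h => simp only [Bool.and_eq_true, decide_eq_true_eq] at h; omega
    · exact le_refl b

theorem mem_le_foldl_upd (P : String × Int → Bool) (l : List (String × Int)) (b : Int)
    (kv : String × Int) (h : kv ∈ l) (hP : P kv = true) :
    kv.2 ≤ l.foldl (pvUpd P) b := by
  induction l generalizing b with
  | nil => cases h
  | cons a l ih =>
    simp only [List.foldl_cons]
    rcases List.mem_cons.mp h with rfl | h
    · refine le_trans ?_ (le_foldl_upd P l _)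
      unfold pvUpd
      simp [hP]; split <;> omega
    · exact ih _ h

theorem foldl_upd_le (P : String × Int → Bool) (l : List (String × Int)) (b : Int) (c : Int)
    (hb : b ≤ c) (hc : ∀ kv ∈ l, P kv = true → kv.2 ≤ c) :
    l.foldl (pvUpd P) b ≤ c := by
  induction l generalizing b with
  | nil => simpa
  | cons a l ih =>
    simp only [List.foldl_cons]
    refine ih _ ?_ (fun kv h hP => hc kv (List.mem_cons_of_mem _ h) hP)
    unfold pvUpd
    split
    · next h => exact hc a List.mem_cons_self (by simp_all)
    · exact hb

-- the same facts for the outer scan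
theorem scan_mono (t : List Char) : ∀ (l : List Nat) (b : Int),
    b ≤ l.foldl (fun best i => pvInner t i best) b := by
  intro l
  induction l with
  | nil => intro b; simp
  | cons j l ih =>
    intro b
    simp only [List.foldl_cons]
    exact le_trans (le_foldl_upd _ pvKW b) (ih _)

theorem le_scan_of_match (t : List Char) (i : Nat) (hi : i < t.length)
    (kv : String × Int) (hkv : kv ∈ pvKW) (hP : pvStartsAt t i kv.1 = true) :
    kv.2 ≤ pvScan t := by
  unfold pvScan
  have aux : ∀ (L : List Nat) (b : Int), i ∈ L →
      kv.2 ≤ L.foldl (fun best i => pvInner t i best) b := by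
    intro L
    induction L with
    | nil => intro b hm; cases hm
    | cons j l ih =>
      intro b hm
      simp only [List.foldl_cons]
      rcases List.mem_cons.mp hm with rfl | hm
      · exact le_trans (mem_le_foldl_upd _ pvKW b kv hkv hP) (scan_mono t l _)
      · exact ih _ hm
  exact aux _ 0 (List.mem_range.mpr hi)

theorem scan_le (t : List Char) (c : Int) (h0 : 0 ≤ c)
    (hc : ∀ i, i < t.length → ∀ kv ∈ pvKW, pvStartsAt t i kv.1 = true → kv.2 ≤ c) :
    pvScan t ≤ c := by
  unfold pvScan
  have : ∀ (l : List Nat), (∀ i ∈ l, i < t.length) → ∀ b, b ≤ c →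
      l.foldl (fun best i => pvInner t i best) b ≤ c := by
    intro l
    induction l with
    | nil => intro _ b hb; simpa
    | cons j l ih =>
      intro hl b hb
      simp only [List.foldl_cons]
      refine ih (fun i hi => hl i (List.mem_cons_of_mem _ hi)) _ ?_
      exact foldl_upd_le _ pvKW b c hb (fun kv hkv hP => hc j (hl j List.mem_cons_self) kv hkv hP)
  exact this _ (fun i hi => List.mem_range.mp hi) 0 h0

theorem zero_le_scan (t : List Char) : (0 : Int) ≤ pvScan t :=
  scan_mono t _ 0

-- keyword occurrence as substring ↔ prefix at some in-range position
theorem isIn_iff_startsAt (t : List Char) (w : String) (hw : w.toList ≠ []) :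
    PySem.Chars.isIn w.toList t = true ↔ ∃ i, i < t.length ∧ pvStartsAt t i w = true := by
  rw [← PySem.Chars.exists_prefix_drop_iff_isIn]
  constructor
  · rintro ⟨j, hj⟩
    have hjlt : j < t.length := by
      by_contra h
      have : t.drop j = [] := List.drop_eq_nil_of_le (by omega)
      rw [this] at hj
      exact hw (List.prefix_nil.mp hj)
    exact ⟨j, hjlt, by simpa [pvStartsAt, PySem.Chars.startswith_iff] using hj⟩
  · rintro ⟨i, _, hP⟩
    exact ⟨i, (PySem.Chars.startswith_iff _ _).mp hP⟩

-- table facts (decidable on the literal lists)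
theorem kw_score_le_eight : ∀ kv ∈ pvKW, kv.2 ≤ 8 := by decide
theorem kw_nonempty : ∀ kv ∈ pvKW, kv.1.toList ≠ [] := by decide

-- tier ↔ table correspondences
theorem high_mem_kw : ∀ w ∈ pvHighWords, (w, (8:Int)) ∈ pvKW := by decide
theorem mid_mem_kw : ∀ w ∈ pvMidWords, (w, (6:Int)) ∈ pvKW := by decide
theorem low_mem_kw : ∀ w ∈ pvLowWords, (w, (3:Int)) ∈ pvKW := by decide
theorem kw_tier : ∀ kv ∈ pvKW,
    (kv.2 = 8 ∧ kv.1 ∈ pvHighWords) ∨ (kv.2 = 6 ∧ kv.1 ∈ pvMidWords) ∨ (kv.2 = 3 ∧ kv.1 ∈ pvLowWords) := by decide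

-- lower bound: a matched tier word pushes the scan to at least its score
theorem scan_ge_of_tier (t : List Char) (words : List String) (s : Int)
    (hmem : ∀ w ∈ words, (w, s) ∈ pvKW)
    (h : words.any (fun w => PySem.Chars.isIn w.toList t) = true) :
    s ≤ pvScan t := by
  rcases List.any_eq_true.mp h with ⟨w, hw, hin⟩
  have hne : w.toList ≠ [] := kw_nonempty _ (hmem w hw)
  rcases (isIn_iff_startsAt t w hne).mp hin with ⟨i, hi, hP⟩
  exact le_scan_of_match t i hi (w, s) (hmem w hw) hP

-- upper bound driver: every matched keyword's score is bounded given which tiers are absent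
theorem scan_upper (t : List Char) (c : Int) (h0 : 0 ≤ c)
    (hH : c < 8 → pvHighWords.any (fun w => PySem.Chars.isIn w.toList t) = false)
    (hM : c < 6 → pvMidWords.any (fun w => PySem.Chars.isIn w.toList t) = false)
    (hL : c < 3 → pvLowWords.any (fun w => PySem.Chars.isIn w.toList t) = false) :
    pvScan t ≤ c := by
  refine scan_le t c h0 ?_
  intro i hi kv hkv hP
  have hin : PySem.Chars.isIn kv.1.toList t = true :=
    (isIn_iff_startsAt t kv.1 (kw_nonempty _ hkv)).mpr ⟨i, hi, hP⟩
  rcases kw_tier kv hkv with ⟨hs, hw⟩ | ⟨hs, hw⟩ | ⟨hs, hw⟩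
  · rw [hs]; by_contra hlt
    have hf := hH (by omega)
    rw [List.any_eq_false] at hf
    exact absurd hin (by simpa using hf kv.1 hw)
  · rw [hs]; by_contra hlt
    have hf := hM (by omega)
    rw [List.any_eq_false] at hf
    exact absurd hin (by simpa using hf kv.1 hw)
  · rw [hs]; by_contra hlt
    have hf := hL (by omega)
    rw [List.any_eq_false] at hf
    exact absurd hin (by simpa using hf kv.1 hw)

-- ===== VERDICT (by name: the statement is the Claim_ definition above) =====
theorem score_from_text_py_spec : Claim_equal_score_from_text_py := by
  intro value default _
  unfold Spec_score_from_text_py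
  rw [alt_eq_scan]
  unfold score_from_text_py
  simp only []
  by_cases h0 : PySem.Str.lower (PySem.Str.strip value) = ""
  · rw [if_pos h0, if_pos h0]
  · rw [if_neg h0, if_neg h0]
    have hconv : ∀ (ws : List String),
        (ws.any fun w => PySem.Str.isIn w (PySem.Str.lower (PySem.Str.strip value)))
          = (ws.any fun w => PySem.Chars.isIn w.toList (PySem.Str.lower (PySem.Str.strip value)).toList) := by
      intro ws; rfl
    set t := (PySem.Str.lower (PySem.Str.strip value)).toList with ht
    by_cases h1 : (pvHighWords.any fun w => PySem.Chars.isIn w.toList t) = true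
    · rw [if_pos (by rw [hconv]; exact h1)]
      have hge : (8:Int) ≤ pvScan t := scan_ge_of_tier t pvHighWords 8 high_mem_kw h1
      have hle : pvScan t ≤ 8 := scan_le t 8 (by norm_num)
        (fun i hi kv hkv _ => kw_score_le_eight kv hkv)
      rw [le_antisymm hle hge]
      norm_num
    · rw [if_neg (by rw [hconv]; exact h1)]
      by_cases h2 : (pvMidWords.any fun w => PySem.Chars.isIn w.toList t) = true
      · rw [if_pos (by rw [hconv]; exact h2)]
        have hge : (6:Int) ≤ pvScan t := scan_ge_of_tier t pvMidWords 6 mid_mem_kw h2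
        have hle : pvScan t ≤ 6 := scan_upper t 6 (by norm_num)
          (fun _ => by simpa using h1) (by intro h; omega) (by intro h; omega)
        rw [le_antisymm hle hge]
        norm_num
      · rw [if_neg (by rw [hconv]; exact h2)]
        by_cases h3 : (pvLowWords.any fun w => PySem.Chars.isIn w.toList t) = true
        · rw [if_pos (by rw [hconv]; exact h3)]
          have hge : (3:Int) ≤ pvScan t := scan_ge_of_tier t pvLowWords 3 low_mem_kw h3
          have hle : pvScan t ≤ 3 := scan_upper t 3 (by norm_num)
            (fun _ => by simpa using h1) (fun _ => by simpa using h2) (by intro h; omega)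
          rw [le_antisymm hle hge]
          norm_num
        · rw [if_neg (by rw [hconv]; exact h3)]
          have hle : pvScan t ≤ 0 := scan_upper t 0 le_rfl
            (fun _ => by simpa using h1) (fun _ => by simpa using h2) (fun _ => by simpa using h3)
          rw [le_antisymm hle (zero_le_scan t)]
          norm_num
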